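-- pv_equiv track=rewrite | github.com/MadScie254/EconoNet | src/notebook_integration.py | _categorize_notebook
-- ===== SOURCE A (Python) =====
-- def _categorize_notebook(notebook_name: str) -> str:
--     """Categorize notebook based on name"""
--
--     name_lower = notebook_name.lower()
--
--     if any(word in name_lower for word in ['inflation', 'price']):
--         return 'Inflation Analysis'
--     elif any(word in name_lower for word in ['fx', 'exchange', 'currency']):
--         return 'Foreign Exchange'
--     elif any(word in name_lower for word in ['gdp', 'growth', 'economic']):
--         return 'GDP & Growth'
--     elif any(word in name_lower for word in ['risk', 'var', 'stress']):
--         return 'Risk Analysis'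
--     elif any(word in name_lower for word in ['trade', 'export', 'import']):
--         return 'Trade Analysis'
--     elif any(word in name_lower for word in ['debt', 'fiscal', 'government']):
--         return 'Fiscal Analysis'
--     elif any(word in name_lower for word in ['monetary', 'policy', 'cbr']):
--         return 'Monetary Policy'
--     elif any(word in name_lower for word in ['neural', 'ai', 'ml', 'prophet']):
--         return 'AI/ML Models'
--     elif 'eda' in name_lower or 'exploration' in name_lower:
--         return 'Data Exploration'
--     else:
--         return 'General Analysis'
-- ===== SOURCE B (Python) =====
-- _KEYWORDS = [
--     ('inflation', 0), ('price', 0),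
--     ('fx', 1), ('exchange', 1), ('currency', 1),
--     ('gdp', 2), ('growth', 2), ('economic', 2),
--     ('risk', 3), ('var', 3), ('stress', 3),
--     ('trade', 4), ('export', 4), ('import', 4),
--     ('debt', 5), ('fiscal', 5), ('government', 5),
--     ('monetary', 6), ('policy', 6), ('cbr', 6),
--     ('neural', 7), ('ai', 7), ('ml', 7), ('prophet', 7),
--     ('eda', 8), ('exploration', 8),
-- ]
--
-- _CATEGORIES = [
--     'Inflation Analysis', 'Foreign Exchange', 'GDP & Growth',
--     'Risk Analysis', 'Trade Analysis', 'Fiscal Analysis',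
--     'Monetary Policy', 'AI/ML Models', 'Data Exploration',
--     'General Analysis',
-- ]
--
--
-- def _categorize_notebook(notebook_name: str) -> str:
--     """Categorize notebook based on name"""
--     name_lower = notebook_name.lower()
--     best = len(_CATEGORIES) - 1
--     for word, prio in _KEYWORDS:
--         if prio < best and word in name_lower:
--             best = prio
--     return _CATEGORIES[best]
-- ===== Notes on version B (the rewrite author's own statement) =====
-- stated objective: alternative
-- what changed: Replaced the first-match elif cascade with an exhaustive single pass over a flat (keyword, priority) list that keeps the minimum matched priority in an accumulator and indexes a category array with it at the end; no early return or per-branch dispatch.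
import Mathlib
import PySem

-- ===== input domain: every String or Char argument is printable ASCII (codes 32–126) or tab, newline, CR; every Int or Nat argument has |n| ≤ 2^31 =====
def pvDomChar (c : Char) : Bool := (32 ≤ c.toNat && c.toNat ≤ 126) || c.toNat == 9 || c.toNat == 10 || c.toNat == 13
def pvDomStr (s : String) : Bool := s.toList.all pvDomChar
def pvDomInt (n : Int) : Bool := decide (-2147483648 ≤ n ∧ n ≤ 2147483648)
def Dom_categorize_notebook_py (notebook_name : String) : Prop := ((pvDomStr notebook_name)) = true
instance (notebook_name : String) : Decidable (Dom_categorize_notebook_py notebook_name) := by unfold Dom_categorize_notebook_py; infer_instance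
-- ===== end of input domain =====

-- B replaces A's first-match elif cascade by an exhaustive pass over a flat (keyword, priority)
-- list keeping the minimum matched priority, then indexes a category array (alternative, same cost).


-- ===== PORT A =====
-- A's elif cascade, transliterated branch by branch
def categorize_notebook_py (notebook_name : String) : String :=
  let name_lower := PySem.Str.lower notebook_name
  if (["inflation", "price"].any (fun word => PySem.Str.isIn word name_lower)) then
    "Inflation Analysis"
  else if (["fx", "exchange", "currency"].any (fun word => PySem.Str.isIn word name_lower)) then
    "Foreign Exchange"
  else if (["gdp", "growth", "economic"].any (fun word => PySem.Str.isIn word name_lower)) then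
    "GDP & Growth"
  else if (["risk", "var", "stress"].any (fun word => PySem.Str.isIn word name_lower)) then
    "Risk Analysis"
  else if (["trade", "export", "import"].any (fun word => PySem.Str.isIn word name_lower)) then
    "Trade Analysis"
  else if (["debt", "fiscal", "government"].any (fun word => PySem.Str.isIn word name_lower)) then
    "Fiscal Analysis"
  else if (["monetary", "policy", "cbr"].any (fun word => PySem.Str.isIn word name_lower)) then
    "Monetary Policy"
  else if (["neural", "ai", "ml", "prophet"].any (fun word => PySem.Str.isIn word name_lower)) then
    "AI/ML Models"
  else if (PySem.Str.isIn "eda" name_lower || PySem.Str.isIn "exploration" name_lower) then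
    "Data Exploration"
  else
    "General Analysis"

-- ===== PORT B =====
-- B: flat (keyword, priority) list; one exhaustive fold keeping the minimum matched priority.
def pvKeywords : List (String × Nat) :=
  [("inflation", 0), ("price", 0),
   ("fx", 1), ("exchange", 1), ("currency", 1),
   ("gdp", 2), ("growth", 2), ("economic", 2),
   ("risk", 3), ("var", 3), ("stress", 3),
   ("trade", 4), ("export", 4), ("import", 4),
   ("debt", 5), ("fiscal", 5), ("government", 5),
   ("monetary", 6), ("policy", 6), ("cbr", 6),
   ("neural", 7), ("ai", 7), ("ml", 7), ("prophet", 7),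
   ("eda", 8), ("exploration", 8)]

def pvCategories : List String :=
  ["Inflation Analysis", "Foreign Exchange", "GDP & Growth",
   "Risk Analysis", "Trade Analysis", "Fiscal Analysis",
   "Monetary Policy", "AI/ML Models", "Data Exploration",
   "General Analysis"]

def categorize_notebook_py_alt (notebook_name : String) : String :=
  let name_lower := PySem.Str.lower notebook_name
  let best := pvKeywords.foldl
    (fun best wp => if wp.2 < best ∧ PySem.Str.isIn wp.1 name_lower then wp.2 else best)
    (pvCategories.length - 1)
  -- Python's _CATEGORIES[best]; the accumulator never exceeds the start 9 < 10, so plain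
  -- indexing with a default is exact here.
  pvCategories.getD best ""

-- ===== PRECONDITION & SPEC =====
def Spec_categorize_notebook_py (notebook_name : String) (out : String) : Prop := out = categorize_notebook_py_alt notebook_name
instance (notebook_name : String) (out : String) : Decidable (Spec_categorize_notebook_py notebook_name out) := by unfold Spec_categorize_notebook_py; infer_instance

-- ===== CLAIM (what is proved, stated in full; the proofs are below) =====
def Claim_equal_categorize_notebook_py : Prop := ∀ (notebook_name : String), Dom_categorize_notebook_py notebook_name → Spec_categorize_notebook_py notebook_name (categorize_notebook_py notebook_name)

-- ===== LEMMAS AND PROOFS =====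
-- If every keyword priority in the list is ≥ the accumulator, B's fold leaves it unchanged.
theorem pvFoldSkip (m : String → Bool) (l : List (String × Nat)) (b : Nat)
    (h : ∀ p ∈ l, ¬ p.2 < b) :
    l.foldl (fun best wp => if wp.2 < best ∧ m wp.1 then wp.2 else best) b = b := by
  induction l with
  | nil => rfl
  | cons p l ih =>
    simp only [List.foldl_cons]
    rw [if_neg (fun hc => h p (List.mem_cons_self ..) hc.1)]
    exact ih (fun q hq => h q (List.mem_cons_of_mem _ hq))

-- Folding B's step over one priority group drops the accumulator to i iff i improves on it
-- and some word of the group matches.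
theorem pvGroupFold (m : String → Bool) (i : Nat) (ws : List String) (best : Nat) :
    (ws.map (fun w => (w, i))).foldl
        (fun b wp => if wp.2 < b ∧ m wp.1 then wp.2 else b) best
      = if i < best ∧ ws.any m then i else best := by
  induction ws generalizing best with
  | nil => simp
  | cons w ws ih =>
    simp only [List.map_cons, List.foldl_cons, List.any_cons]
    by_cases hw : m w = true
    · by_cases hib : i < best
      · simp [hw, hib, ih]
      · simp [hw, hib, ih]
    · simp at hw
      simp [hw, ih]

-- B's whole fold over groups of strictly increasing priorities (all below the start value)
-- computes the first matching group's priority — a linear if-chain.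
theorem pvChainFold (m : String → Bool) (gs : List (Nat × List String)) (b : Nat)
    (hs : gs.Pairwise (fun x y => x.1 < y.1)) (hb : ∀ g ∈ gs, g.1 < b) :
    (gs.flatMap (fun g => g.2.map (fun w => (w, g.1)))).foldl
        (fun best wp => if wp.2 < best ∧ m wp.1 then wp.2 else best) b
      = gs.foldr (fun g acc => if g.2.any m then g.1 else acc) b := by
  induction gs with
  | nil => rfl
  | cons g gs ih =>
    simp only [List.flatMap_cons, List.foldl_append, List.foldr_cons]
    have hgb : g.1 < b := hb g (List.mem_cons_self ..)
    rw [pvGroupFold]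
    by_cases hany : g.2.any m = true
    · rw [if_pos ⟨hgb, hany⟩, if_pos hany]
      refine pvFoldSkip m _ g.1 ?_
      intro p hp hlt
      rcases List.mem_flatMap.mp hp with ⟨g', hg', hpg'⟩
      rcases List.mem_map.mp hpg' with ⟨w, hw, rfl⟩
      simp only at hlt
      have : g.1 < g'.1 := (List.pairwise_cons.mp hs).1 g' hg'
      omega
    · rw [if_neg (fun hc => hany hc.2), if_neg hany]
      exact ih (List.pairwise_cons.mp hs).2 (fun g' hg' => hb g' (List.mem_cons_of_mem _ hg'))

-- pvKeywords, viewed as nine priority groups.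
def pvGroups : List (Nat × List String) :=
  [(0, ["inflation", "price"]), (1, ["fx", "exchange", "currency"]),
   (2, ["gdp", "growth", "economic"]), (3, ["risk", "var", "stress"]),
   (4, ["trade", "export", "import"]), (5, ["debt", "fiscal", "government"]),
   (6, ["monetary", "policy", "cbr"]), (7, ["neural", "ai", "ml", "prophet"]),
   (8, ["eda", "exploration"])]

theorem pvKeywords_flat :
    pvKeywords = pvGroups.flatMap (fun g => g.2.map (fun w => (w, g.1))) := by rfl

-- ===== VERDICT (by name: the statement is the Claim_ definition above) =====
theorem categorize_notebook_py_spec : Claim_equal_categorize_notebook_py := by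
  intro notebook_name _
  unfold Spec_categorize_notebook_py categorize_notebook_py categorize_notebook_py_alt
  dsimp only
  rw [pvKeywords_flat,
    pvChainFold (fun w => PySem.Str.isIn w (PySem.Str.lower notebook_name)) pvGroups _
      (by decide) (by decide)]
  simp only [pvGroups, List.foldr_cons, List.foldr_nil, List.any_cons, List.any_nil,
    Bool.or_false]
  by_cases h0 : (PySem.Str.isIn "inflation" (PySem.Str.lower notebook_name) || (PySem.Str.isIn "price" (PySem.Str.lower notebook_name))) = true
  · simp_all [pvCategories]
  by_cases h1 : (PySem.Str.isIn "fx" (PySem.Str.lower notebook_name) || (PySem.Str.isIn "exchange" (PySem.Str.lower notebook_name) || (PySem.Str.isIn "currency" (PySem.Str.lower notebook_name)))) = true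
  · simp_all [pvCategories]
  by_cases h2 : (PySem.Str.isIn "gdp" (PySem.Str.lower notebook_name) || (PySem.Str.isIn "growth" (PySem.Str.lower notebook_name) || (PySem.Str.isIn "economic" (PySem.Str.lower notebook_name)))) = true
  · simp_all [pvCategories]
  by_cases h3 : (PySem.Str.isIn "risk" (PySem.Str.lower notebook_name) || (PySem.Str.isIn "var" (PySem.Str.lower notebook_name) || (PySem.Str.isIn "stress" (PySem.Str.lower notebook_name)))) = true
  · simp_all [pvCategories]
  by_cases h4 : (PySem.Str.isIn "trade" (PySem.Str.lower notebook_name) || (PySem.Str.isIn "export" (PySem.Str.lower notebook_name) || (PySem.Str.isIn "import" (PySem.Str.lower notebook_name)))) = true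
  · simp_all [pvCategories]
  by_cases h5 : (PySem.Str.isIn "debt" (PySem.Str.lower notebook_name) || (PySem.Str.isIn "fiscal" (PySem.Str.lower notebook_name) || (PySem.Str.isIn "government" (PySem.Str.lower notebook_name)))) = true
  · simp_all [pvCategories]
  by_cases h6 : (PySem.Str.isIn "monetary" (PySem.Str.lower notebook_name) || (PySem.Str.isIn "policy" (PySem.Str.lower notebook_name) || (PySem.Str.isIn "cbr" (PySem.Str.lower notebook_name)))) = true
  · simp_all [pvCategories]
  by_cases h7 : (PySem.Str.isIn "neural" (PySem.Str.lower notebook_name) || (PySem.Str.isIn "ai" (PySem.Str.lower notebook_name) || (PySem.Str.isIn "ml" (PySem.Str.lower notebook_name) || (PySem.Str.isIn "prophet" (PySem.Str.lower notebook_name))))) = true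
  · simp_all [pvCategories]
  by_cases h8 : (PySem.Str.isIn "eda" (PySem.Str.lower notebook_name) || (PySem.Str.isIn "exploration" (PySem.Str.lower notebook_name))) = true
  · simp_all [pvCategories]
  · simp_all [pvCategories]
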